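-- pv_equiv track=rewrite | github.com/tallguy188/TIL | Algorithm/Baekjoon/1000-5000/1259.py | fellindrom
-- ===== SOURCE A (Python) =====
-- def fellindrom(words):
--
--     rlist = []
--
--     # 각 입력받은 리스트 숫자마다 거꾸로 뒤집어도 똑같나 확인
--     for word in words:
--         r_word = word[::-1]
--         if r_word == word:
--             rlist.append('yes')
--         else:
--             rlist.append('no')
--
--     return rlist
-- ===== SOURCE B (Python) =====
-- def fellindrom(words):
--     return ['yes' if all(w[i] == w[len(w) - 1 - i] for i in range(len(w) // 2))
--             else 'no'
--             for w in words]
-- ===== Notes on version B (the rewrite author's own statement) =====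
-- stated objective: idiomatic
-- what changed: Replaces the explicit accumulator loop with a list comprehension and the reversed-copy comparison w[::-1] == w with a short-circuiting half-scan all(w[i] == w[len(w)-1-i] for i in range(len(w)//2)) that compares characters inward without allocating a reversed string.
import Mathlib
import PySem

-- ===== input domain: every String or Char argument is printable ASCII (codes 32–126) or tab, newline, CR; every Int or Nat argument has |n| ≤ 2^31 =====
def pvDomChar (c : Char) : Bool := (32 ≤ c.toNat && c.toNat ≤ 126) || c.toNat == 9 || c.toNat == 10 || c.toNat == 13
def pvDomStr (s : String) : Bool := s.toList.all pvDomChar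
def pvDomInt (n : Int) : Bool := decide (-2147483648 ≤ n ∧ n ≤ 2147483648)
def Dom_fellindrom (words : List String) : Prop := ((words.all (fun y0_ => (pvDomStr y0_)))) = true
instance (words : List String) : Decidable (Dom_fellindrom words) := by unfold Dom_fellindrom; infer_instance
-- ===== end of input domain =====

-- B replaces the accumulator loop + reversed-copy comparison with a map over a half-scan
-- palindrome test (compares w[i] with w[n-1-i] for i < n//2); idiomatic, same cost.


-- ===== PORT A =====
-- word[::-1] is Str.slice? with step -1, which is always `some`; getD "" just unwraps it.
def fellindrom (words : List String) : List String :=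
  words.foldl (fun rlist word =>
    let r_word := (PySem.Str.slice? word none none (-1)).getD ""
    if r_word = word then rlist ++ ["yes"] else rlist ++ ["no"]) []

-- ===== PORT B =====
-- w[i] / w[n-1-i] for i < n/2 are always in range, so getD is exact here.
def pvHalfPal (l : List Char) : Bool :=
  (List.range (l.length / 2)).all (fun i => l.getD i ' ' == l.getD (l.length - 1 - i) ' ')

def fellindrom_alt (words : List String) : List String :=
  words.map (fun w => if pvHalfPal w.toList then "yes" else "no")

-- ===== PRECONDITION & SPEC =====
def Spec_fellindrom (words : List String) (out : List String) : Prop := out = fellindrom_alt words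
instance (words : List String) (out : List String) : Decidable (Spec_fellindrom words out) := by unfold Spec_fellindrom; infer_instance

-- ===== CLAIM (what is proved, stated in full; the proofs are below) =====
def Claim_equal_fellindrom : Prop := ∀ (words : List String), Dom_fellindrom words → Spec_fellindrom words (fellindrom words)

-- ===== LEMMAS AND PROOFS =====

theorem pvGetEq (l : List Char) (i j : Nat) (h : i = j) (hi : i < l.length) :
    l[i]'hi = l[j]'(h ▸ hi) := by subst h; rfl

theorem pvHalfPal_iff (l : List Char) : pvHalfPal l = true ↔ l.reverse = l := by
  unfold pvHalfPal
  simp only [List.all_eq_true, List.mem_range, beq_iff_eq]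
  constructor
  · intro h
    apply List.ext_getElem (by simp)
    intro i hi hi'
    rw [List.getElem_reverse]
    rcases lt_trichotomy i (l.length - 1 - i) with hlt | heq | hgt
    · have hi2 : i < l.length / 2 := by omega
      have := h i hi2
      rw [List.getD_eq_getElem l ' ' (by omega), List.getD_eq_getElem l ' ' (by omega)] at this
      exact this.symm
    · exact pvGetEq l _ _ heq.symm (by omega)
    · have hj : l.length - 1 - i < l.length / 2 := by omega
      have := h (l.length - 1 - i) hj
      rw [List.getD_eq_getElem l ' ' (by omega), List.getD_eq_getElem l ' ' (by omega)] at this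
      exact this.trans (pvGetEq l _ _ (by omega) (by omega))
  · intro h i hi
    have hi1 : i < l.length := by omega
    have hi2 : l.length - 1 - i < l.length := by omega
    have hir : i < l.reverse.length := by simpa using hi1
    have hr : l.reverse[i]'hir = l[l.length - 1 - i]'hi2 := List.getElem_reverse _
    have hl : l.reverse[i]'hir = l[i]'hi1 := List.getElem_of_eq h _
    rw [List.getD_eq_getElem l ' ' hi1, List.getD_eq_getElem l ' ' hi2, ← hl, hr]

theorem pvBody_eq (word : String) :
    (if (PySem.Str.slice? word none none (-1)).getD "" = word then "yes" else "no")
      = (if pvHalfPal word.toList then "yes" else "no") := by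
  rw [PySem.Str.slice?_none_none_neg_one]
  refine if_congr ?_ rfl rfl
  rw [show (some (String.ofList word.toList.reverse)).getD "" = String.ofList word.toList.reverse from rfl]
  rw [pvHalfPal_iff]
  constructor
  · intro h
    have := congrArg String.toList h
    simpa using this
  · intro h
    rw [h]
    simp [String.ofList_toList]

theorem pvFold (words : List String) (acc : List String) :
    words.foldl (fun rlist word =>
      let r_word := (PySem.Str.slice? word none none (-1)).getD ""
      if r_word = word then rlist ++ ["yes"] else rlist ++ ["no"]) acc
    = acc ++ fellindrom_alt words := by
  induction words generalizing acc with
  | nil => simp [fellindrom_alt]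
  | cons w ws ih =>
    simp only [List.foldl_cons, fellindrom_alt, List.map_cons]
    rw [show (if (PySem.Str.slice? w none none (-1)).getD "" = w then acc ++ ["yes"] else acc ++ ["no"])
        = acc ++ [if (PySem.Str.slice? w none none (-1)).getD "" = w then "yes" else "no"] from by split <;> rfl]
    rw [pvBody_eq, ih]
    simp [fellindrom_alt]

-- ===== VERDICT (by name: the statement is the Claim_ definition above) =====
theorem fellindrom_spec : Claim_equal_fellindrom := by
  intro words _
  unfold Spec_fellindrom fellindrom
  simpa using pvFold words []
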